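-- pv_equiv track=rewrite | github.com/pythonarcade/arcade | arcade/examples/decorator_drawing_example_03.py | fix_points
-- ===== SOURCE A (Python) =====
-- def fix_points(points):
--     last_y = None
--     last_x = None
--     new_list = []
--     for point in points:
--         x = int(point[0])
--         y = int(point[1])
--
--         if last_y is None or y != last_y:
--             if last_y is None:
--                 last_x = x
--                 last_y = y
--
--             x1 = last_x
--             x2 = x
--             y1 = last_y
--             y2 = y
--
--             new_list.append((x1, 0))
--             new_list.append((x1, y1))
--             new_list.append((x2, y2))
--             new_list.append((x2, 0))
--
--             last_x = x
--             last_y = y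
--
--     return new_list
-- ===== SOURCE B (Python) =====
-- def fix_points(points):
--     # Pass 1: keep only points whose (int) y differs from the previously kept y.
--     kept = []
--     last_y = None
--     for point in points:
--         x = int(point[0])
--         y = int(point[1])
--         if last_y is None or y != last_y:
--             kept.append((x, y))
--             last_y = y
--     if not kept:
--         return []
--     # Pass 2: one quad per adjacent pair; the duplicated head yields the
--     # degenerate first quad.
--     augmented = [kept[0]] + kept
--     out = []
--     for (x1, y1), (x2, y2) in zip(augmented, augmented[1:]):
--         out.append((x1, 0))
--         out.append((x1, y1))
--         out.append((x2, y2))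
--         out.append((x2, 0))
--     return out
-- ===== Notes on version B (the rewrite author's own statement) =====
-- stated objective: alternative
-- what changed: Replaces the single stateful loop (tracking last_x/last_y options and emitting quads inline) with two passes: first filter the points whose y changes, then generate one quad per adjacent pair of the kept list with its head duplicated.
import Mathlib
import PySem

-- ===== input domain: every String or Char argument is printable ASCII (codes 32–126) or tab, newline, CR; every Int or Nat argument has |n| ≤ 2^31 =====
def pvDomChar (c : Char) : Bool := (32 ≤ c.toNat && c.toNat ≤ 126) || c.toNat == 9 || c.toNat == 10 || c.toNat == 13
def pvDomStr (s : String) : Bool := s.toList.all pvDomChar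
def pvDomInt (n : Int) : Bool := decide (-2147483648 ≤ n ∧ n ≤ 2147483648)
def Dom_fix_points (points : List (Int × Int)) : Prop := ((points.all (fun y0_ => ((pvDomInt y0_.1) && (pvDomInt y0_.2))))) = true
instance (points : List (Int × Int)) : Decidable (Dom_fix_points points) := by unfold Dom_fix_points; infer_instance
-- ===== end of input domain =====

-- B replaces A's single stateful loop by two passes (filter y-changes, then one quad per adjacent pair of the kept list); alternative decomposition, same cost.


-- ===== PORT A =====
-- A's loop: state (last_x, last_y, new_list); int(...) is the identity on Int inputs.
def fix_points_loop : Option Int → Option Int → List (Int × Int) → List (Int × Int) → List (Int × Int)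
  | _, _, new_list, [] => new_list
  | last_x, last_y, new_list, (px, py) :: rest =>
    let x := px
    let y := py
    match last_y with
    | none =>
        -- `last_y is None` branch: last_x := x, last_y := y before emitting
        fix_points_loop (some x) (some y)
          (new_list ++ [(x, 0), (x, y), (x, y), (x, 0)]) rest
    | some ly =>
        if y ≠ ly then
          let x1 := last_x.getD 0   -- last_x is always `some` once last_y is
          fix_points_loop (some x) (some y)
            (new_list ++ [(x1, 0), (x1, ly), (x, y), (x, 0)]) rest
        else
          fix_points_loop last_x last_y new_list rest

def fix_points (points : List (Int × Int)) : List (Int × Int) :=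
  fix_points_loop none none [] points

-- ===== PORT B =====
-- Pass 1 of Source B: keep points whose y differs from the previously kept y.
def fix_points_kept : Option Int → List (Int × Int) → List (Int × Int)
  | _, [] => []
  | last_y, (px, py) :: rest =>
    match last_y with
    | none => (px, py) :: fix_points_kept (some py) rest
    | some ly =>
        if py ≠ ly then (px, py) :: fix_points_kept (some py) rest
        else fix_points_kept last_y rest

-- Pass 2 of Source B: one quad per adjacent pair of `augmented = [kept[0]] + kept`.
def fix_points_alt (points : List (Int × Int)) : List (Int × Int) :=
  let kept := fix_points_kept none points
  match kept with
  | [] => []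
  | k0 :: _ =>
      ((k0 :: kept).zip kept).flatMap
        (fun p => [(p.1.1, 0), (p.1.1, p.1.2), (p.2.1, p.2.2), (p.2.1, 0)])

-- ===== PRECONDITION & SPEC =====
def Spec_fix_points (points : List (Int × Int)) (out : List (Int × Int)) : Prop := out = fix_points_alt points
instance (points : List (Int × Int)) (out : List (Int × Int)) : Decidable (Spec_fix_points points out) := by unfold Spec_fix_points; infer_instance

-- ===== CLAIM (what is proved, stated in full; the proofs are below) =====
def Claim_equal_fix_points : Prop := ∀ (points : List (Int × Int)), Dom_fix_points points → Spec_fix_points points (fix_points points)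

-- ===== LEMMAS AND PROOFS =====
theorem fix_points_loop_eq (points : List (Int × Int)) :
    ∀ (lx ly : Int) (acc : List (Int × Int)),
      fix_points_loop (some lx) (some ly) acc points =
      acc ++ (((lx, ly) :: fix_points_kept (some ly) points).zip
               (fix_points_kept (some ly) points)).flatMap
              (fun p => [(p.1.1, 0), (p.1.1, p.1.2), (p.2.1, p.2.2), (p.2.1, 0)]) := by
  induction points with
  | nil => intro lx ly acc; simp [fix_points_loop, fix_points_kept]
  | cons hd tl ih =>
      intro lx ly acc
      obtain ⟨px, py⟩ := hd
      by_cases h : py = ly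
      · subst h
        simp [fix_points_loop, fix_points_kept, ih]
      · simp [fix_points_loop, fix_points_kept, h, ih]

-- ===== VERDICT (by name: the statement is the Claim_ definition above) =====
theorem fix_points_spec : Claim_equal_fix_points := by
  intro points _
  show fix_points points = fix_points_alt points
  cases points with
  | nil => rfl
  | cons hd tl =>
      obtain ⟨px, py⟩ := hd
      simp [fix_points, fix_points_alt, fix_points_loop, fix_points_kept,
            fix_points_loop_eq]
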